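-- pv_equiv track=rewrite | github.com/2az2/PA | code.py | odds_to_back
-- ===== SOURCE A (Python) =====
-- def odds_to_back(list):
-- 	l=len(list)
-- 	i=0
-- 	while i<l:
-- 		if list[i]%2:
-- 			list.insert(len(list),list[i])
-- 			list.remove(list[i])
-- 			l-=1
-- 		else:
-- 			i+=1
-- 	return list
-- ===== SOURCE B (Python) =====
-- def odds_to_back(list):
-- 	list.sort(key=lambda x: x % 2)
-- 	return list
-- ===== Notes on version B (the rewrite author's own statement) =====
-- stated objective: faster
-- what changed: Replaces the quadratic insert/remove rotation loop with a single in-place stable sort on the parity key x % 2, which keeps evens then odds each in original order.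
import Mathlib
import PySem

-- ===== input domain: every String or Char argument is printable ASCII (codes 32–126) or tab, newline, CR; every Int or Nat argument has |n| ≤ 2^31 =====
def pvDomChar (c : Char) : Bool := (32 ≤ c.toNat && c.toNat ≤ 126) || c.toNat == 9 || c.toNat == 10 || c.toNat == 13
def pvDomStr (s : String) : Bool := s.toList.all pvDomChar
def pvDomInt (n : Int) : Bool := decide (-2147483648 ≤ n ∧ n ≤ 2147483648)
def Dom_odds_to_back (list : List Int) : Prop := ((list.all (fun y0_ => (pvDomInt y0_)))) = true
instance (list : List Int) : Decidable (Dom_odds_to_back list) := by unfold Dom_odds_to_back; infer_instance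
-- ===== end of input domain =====

-- B replaces A's quadratic append-and-remove rotation loop by one stable in-place sort on the
-- parity key x % 2; both mutate the argument list in place and return it (equivalence proved
-- about the return value; B performs the same kind of in-place mutation).

-- ===== PORT A =====
-- the while loop of A: state is the list, the shrinking bound l, and the index i
def oddsToBackGo (lst : List Int) (l i : Int) : List Int :=
  if _h : i < l then
    match PySem.List.pyGet? lst i with
    | none => lst          -- IndexError (never reached on the states A's loop produces)
    | some v =>
      if PySem.Int.mod v 2 ≠ 0 then
        let lst2 := PySem.List.insert lst (PySem.List.len lst) v   -- list.insert(len(list), list[i])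
        match PySem.List.remove? lst2 v with
        | none => lst2     -- ValueError (never reached: v is in the list)
        | some lst3 => oddsToBackGo lst3 (l - 1) i
      else
        oddsToBackGo lst l (i + 1)
  else lst
termination_by (l - i).toNat
decreasing_by all_goals omega

def odds_to_back (list : List Int) : List Int :=
  oddsToBackGo list (PySem.List.len list) 0

-- ===== PORT B =====
def odds_to_back_alt (list : List Int) : List Int :=
  PySem.List.sorted list (fun x => PySem.Int.mod x 2)   -- list.sort(key=lambda x: x % 2)

-- ===== PRECONDITION & SPEC =====
def Spec_odds_to_back (list : List Int) (out : List Int) : Prop := out = odds_to_back_alt list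
instance (list : List Int) (out : List Int) : Decidable (Spec_odds_to_back list out) := by unfold Spec_odds_to_back; infer_instance

-- ===== CLAIM (what is proved, stated in full; the proofs are below) =====
def Claim_equal_odds_to_back : Prop := ∀ (list : List Int), Dom_odds_to_back list → Spec_odds_to_back list (odds_to_back list)

-- ===== LEMMAS AND PROOFS =====

-- the element at index |E| of E ++ v :: t is v
lemma pvGetMid (E t : List Int) (v : Int) : (E ++ v :: t)[E.length]? = some v := by
  rw [List.getElem?_append_right (le_refl _)]
  simp

-- removing v from E ++ v :: t when v does not occur in E drops exactly that occurrence
lemma pvRemoveMid (E t : List Int) (v : Int) (h : ∀ x ∈ E, x ≠ v) :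
    PySem.List.remove? (E ++ v :: t) v = some (E ++ t) := by
  induction E with
  | nil => simp
  | cons e E' ih =>
      rw [List.cons_append, PySem.List.remove?_cons_of_ne _ (h e (by simp)),
        ih (fun x hx => h x (by simp [hx]))]
      rfl

-- invariant of A's while loop: E = already-scanned evens, Q = odds moved to the back
lemma pvGoInv (rest E Q : List Int) (hE : ∀ x ∈ E, PySem.Int.mod x 2 = 0) :
    oddsToBackGo (E ++ rest ++ Q) ((E.length : Int) + rest.length) (E.length : Int)
      = E ++ rest.filter (fun x => PySem.Int.mod x 2 == 0)
          ++ (Q ++ rest.filter (fun x => !(PySem.Int.mod x 2 == 0))) := by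
  induction rest generalizing E Q with
  | nil =>
      rw [oddsToBackGo]
      simp
  | cons v rest' ih =>
      rw [oddsToBackGo]
      have hlt : (E.length : Int) < (E.length : Int) + (v :: rest').length := by
        simp
      have hget : PySem.List.pyGet? (E ++ (v :: rest') ++ Q) (E.length : Int) = some v := by
        rw [PySem.List.pyGet?_natCast]
        have h1 : E ++ (v :: rest') ++ Q = E ++ v :: (rest' ++ Q) := by simp
        rw [h1, pvGetMid]
      rw [dif_pos hlt, hget]
      dsimp only
      by_cases hv : PySem.Int.mod v 2 = 0
      · -- even: i advances, v joins E
        have hE' : ∀ x ∈ E ++ [v], PySem.Int.mod x 2 = 0 := by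
          intro x hx
          rcases List.mem_append.mp hx with h | h
          · exact hE x h
          · simp at h; rw [h]; exact hv
        have hstate : E ++ (v :: rest') ++ Q = (E ++ [v]) ++ rest' ++ Q := by simp
        have harith : (E.length : Int) + (v :: rest').length = ((E ++ [v]).length : Int) + rest'.length := by
          simp; omega
        have hidx : (E.length : Int) + 1 = ((E ++ [v]).length : Int) := by simp
        rw [if_neg (not_not_intro hv), hstate, harith, hidx, ih (E ++ [v]) Q hE']
        have hv2 : v % 2 = 0 := by
          rw [← PySem.Int.mod_eq_emod_of_pos (by norm_num : (0:Int) < 2)]; exact hv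
        have hdvd : (2:Int) ∣ v := Int.dvd_of_emod_eq_zero hv2
        simp [hv2]
      · -- odd: v is appended to the back and removed from position i
        have hins : PySem.List.insert (E ++ (v :: rest') ++ Q)
            (PySem.List.len (E ++ (v :: rest') ++ Q)) v = (E ++ (v :: rest') ++ Q) ++ [v] :=
          PySem.List.insert_len _ _
        have hrem : PySem.List.remove? ((E ++ (v :: rest') ++ Q) ++ [v]) v
            = some (E ++ rest' ++ (Q ++ [v])) := by
          have h1 : (E ++ (v :: rest') ++ Q) ++ [v] = E ++ v :: (rest' ++ (Q ++ [v])) := by simp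
          have h2 : E ++ (rest' ++ (Q ++ [v])) = E ++ rest' ++ (Q ++ [v]) := by simp
          rw [h1, pvRemoveMid _ _ _ (fun x hx h => hv (by rw [← h]; exact hE x hx)), h2]
        have harith : (E.length : Int) + (v :: rest').length - 1 = (E.length : Int) + rest'.length := by
          simp; omega
        rw [if_pos hv, hins, hrem]
        dsimp only
        rw [harith, ih E (Q ++ [v]) hE]
        have hv1 : PySem.Int.mod v 2 = 1 := (PySem.Int.mod_two_eq v).resolve_left hv
        have hv2 : v % 2 = 1 := by
          rw [← PySem.Int.mod_eq_emod_of_pos (by norm_num : (0:Int) < 2)]; exact hv1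
        have hnd : ¬ (2:Int) ∣ v := by omega
        simp [hv2]

-- stable insertion of an even element goes right between the evens and the odds
lemma pvInsertByEven (before : Int → Int → Bool) (x : Int) (E O : List Int)
    (hE : ∀ y ∈ E, before x y = false) (hO : ∀ y ∈ O, before x y = true) :
    PySem.List.insertBy before x (E ++ O) = E ++ x :: O := by
  induction E with
  | nil =>
      cases O with
      | nil => simp [PySem.List.insertBy]
      | cons y O' => simp [PySem.List.insertBy, hO y (by simp)]
  | cons e E' ih =>
      simp [PySem.List.insertBy, hE e (by simp),
        ih (fun y hy => hE y (by simp [hy])) ]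

-- invariant of B's stable sort, seen as a left fold of insertions
lemma pvSortInv (xs E O : List Int)
    (hE : ∀ y ∈ E, PySem.Int.mod y 2 = 0) (hO : ∀ y ∈ O, PySem.Int.mod y 2 = 1) :
    xs.foldl (fun acc x =>
        PySem.List.insertBy (fun a b => decide (PySem.Int.mod a 2 < PySem.Int.mod b 2)) x acc)
      (E ++ O)
      = (E ++ xs.filter (fun x => PySem.Int.mod x 2 == 0))
          ++ (O ++ xs.filter (fun x => !(PySem.Int.mod x 2 == 0))) := by
  induction xs generalizing E O with
  | nil => simp
  | cons x xs' ih =>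
      rw [List.foldl_cons]
      by_cases hx : PySem.Int.mod x 2 = 0
      · have hins : PySem.List.insertBy
            (fun a b => decide (PySem.Int.mod a 2 < PySem.Int.mod b 2)) x (E ++ O)
            = (E ++ [x]) ++ O := by
          rw [pvInsertByEven _ _ E O
            (fun y hy => by rw [hx, hE y hy]; decide)
            (fun y hy => by rw [hx, hO y hy]; decide)]
          simp
        rw [hins, ih (E ++ [x]) O
          (by intro y hy; rcases List.mem_append.mp hy with h | h
              · exact hE y h
              · simp at h; rw [h]; exact hx) hO]
        have hx2 : x % 2 = 0 := by
          rw [← PySem.Int.mod_eq_emod_of_pos (by norm_num : (0:Int) < 2)]; exact hx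
        simp [hx2]
      · have hx1 : PySem.Int.mod x 2 = 1 := (PySem.Int.mod_two_eq x).resolve_left hx
        have hins : PySem.List.insertBy
            (fun a b => decide (PySem.Int.mod a 2 < PySem.Int.mod b 2)) x (E ++ O)
            = E ++ (O ++ [x]) := by
          rw [PySem.List.insertBy_of_forall_not_before _ _ _ ?_]
          · simp
          · intro y hy
            rcases List.mem_append.mp hy with h | h
            · rw [hx1, hE y h]; decide
            · rw [hx1, hO y h]; decide
        rw [hins, ih E (O ++ [x]) hE
          (by intro y hy; rcases List.mem_append.mp hy with h | h
              · exact hO y h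
              · simp at h; rw [h]; exact hx1)]
        have hx2 : x % 2 = 1 := by
          rw [← PySem.Int.mod_eq_emod_of_pos (by norm_num : (0:Int) < 2)]; exact hx1
        simp [hx2]

-- ===== VERDICT (by name: the statement is the Claim_ definition above) =====
theorem odds_to_back_spec : Claim_equal_odds_to_back := by
  intro list _
  unfold Spec_odds_to_back odds_to_back odds_to_back_alt
  rw [PySem.List.sorted_eq_foldl_insertBy]
  have hA := pvGoInv list [] [] (by simp)
  have hB := pvSortInv list [] [] (by simp) (by simp)
  simp only [List.append_nil, List.nil_append, List.length_nil, Nat.cast_zero, zero_add] at hA hB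
  have hlen : PySem.List.len list = (list.length : Int) := by simp [PySem.List.len]
  rw [hlen, hA, hB]
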